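-- pv_equiv track=rewrite | github.com/Yusukey01/yusukey01.github.io | Mathematics/Discrete/Python_Code/complexity_m1.py | machine1
-- ===== SOURCE A (Python) =====
-- def machine1(w):
--     tape = list(w)
--
--     # Scan the tape and reject if a 0 is found to the right of a 1. : O(n)
--     seen_one = False
--     for c in tape:
--         if c == '1':
--             seen_one = True
--         elif c == '0' and seen_one:  # a 0 appears after a 1.
--             return False
--
--     # Repeatedly cross off one 0 and one 1 as long as both are present. : O(n^2)
--     while '0' in tape and '1' in tape:
--         # Find the first uncrossed 0 and mark it.
--         idx0 = tape.index('0')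
--         tape[idx0] = 'X'
--
--         # Find the first uncrossed 1 and mark it.
--         idx1 = tape.index('1')
--         tape[idx1] = 'X'
--
--     # If there are any uncrossed 0s or 1s remaining, reject the input. : O(n)
--     if '0' in tape or '1' in tape:
--         return False
--     # Otherwise, accept the input.
--     return True
-- ===== SOURCE B (Python) =====
-- def machine1(w):
--     s = ''.join(c for c in w if c == '0' or c == '1')
--     k = len(s) // 2
--     return s == '0' * k + '1' * k
-- ===== Notes on version B (the rewrite author's own statement) =====
-- stated objective: simpler
-- what changed: Replaces the seen-one scan plus quadratic cross-off-while-loop with building the filtered 0/1 substring once and a single comparison against the canonical string '0'*k+'1'*k with k = len//2.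
import Mathlib
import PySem

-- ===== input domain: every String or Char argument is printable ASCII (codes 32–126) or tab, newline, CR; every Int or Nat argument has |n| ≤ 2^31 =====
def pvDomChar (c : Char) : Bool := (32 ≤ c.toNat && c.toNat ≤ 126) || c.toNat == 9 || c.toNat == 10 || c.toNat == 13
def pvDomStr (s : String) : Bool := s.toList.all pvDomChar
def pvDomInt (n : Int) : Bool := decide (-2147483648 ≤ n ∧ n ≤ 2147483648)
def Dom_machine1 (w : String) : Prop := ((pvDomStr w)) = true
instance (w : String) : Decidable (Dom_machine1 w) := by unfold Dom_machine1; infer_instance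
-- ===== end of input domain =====

-- B replaces A's flag scan + quadratic cross-off loop with one filter pass and a
-- single comparison against the canonical string '0'^k ++ '1'^k (objective: simpler).

-- ===== PORT A =====
-- the for-loop with the seen_one flag (early `return False` = result false)
def machine1Scan : List Char → Bool → Bool
  | [], _ => true
  | c :: r, seen =>
    if c = '1' then machine1Scan r true
    else if c = '0' ∧ seen then false
    else machine1Scan r seen

-- `tape[tape.index(a)] = b` : overwrite the first occurrence of a with b
def machine1Mark (a b : Char) : List Char → List Char
  | [] => []
  | c :: r => if c = a then b :: r else c :: machine1Mark a b r

theorem machine1Mark_count_other (a b c : Char) (h1 : c ≠ a) (h2 : c ≠ b) :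
    ∀ t : List Char, (machine1Mark a b t).count c = t.count c := by
  intro t
  induction t with
  | nil => simp [machine1Mark]
  | cons x r ih =>
    by_cases hx : x = a
    · subst hx
      simp [machine1Mark, List.count_cons, Ne.symm h1, Ne.symm h2]
    · simp [machine1Mark, hx, List.count_cons, ih]

theorem machine1Mark_count_self (a b : Char) (hb : b ≠ a) :
    ∀ t : List Char, a ∈ t → (machine1Mark a b t).count a + 1 = t.count a := by
  intro t
  induction t with
  | nil => simp
  | cons x r ih =>
    intro hm
    by_cases hx : x = a
    · subst hx
      simp [machine1Mark, List.count_cons, hb]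
    · have hr : a ∈ r := by
        rcases List.mem_cons.mp hm with h | h
        · exact absurd h.symm hx
        · exact h
      simp [machine1Mark, hx, List.count_cons, Ne.symm hx, ih hr]

theorem machine1Mark_dec (t : List Char) (h0 : '0' ∈ t) :
    (machine1Mark '1' 'X' (machine1Mark '0' 'X' t)).count '0' < t.count '0' := by
  have h1 : (machine1Mark '1' 'X' (machine1Mark '0' 'X' t)).count '0'
      = (machine1Mark '0' 'X' t).count '0' :=
    machine1Mark_count_other '1' 'X' '0' (by decide) (by decide) _
  have h2 := machine1Mark_count_self '0' 'X' (by decide) t h0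
  omega

-- the while loop
def machine1Cross (t : List Char) : List Char :=
  if h : '0' ∈ t ∧ '1' ∈ t then
    machine1Cross (machine1Mark '1' 'X' (machine1Mark '0' 'X' t))
  else t
termination_by t.count '0'
decreasing_by exact machine1Mark_dec t h.1

def machine1 (w : String) : Bool :=
  let tape := w.toList
  if machine1Scan tape false then
    let t := machine1Cross tape
    if '0' ∈ t ∨ '1' ∈ t then false else true
  else false

-- ===== PORT B =====
-- the generator's condition `c == '0' or c == '1'`
def machine1Is01 (c : Char) : Bool := c == '0' || c == '1'

def machine1_alt (w : String) : Bool :=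
  let s := w.toList.filter machine1Is01
  let k := s.length / 2
  s == List.replicate k '0' ++ List.replicate k '1'

-- ===== PRECONDITION & SPEC =====
def Spec_machine1 (w : String) (out : Bool) : Prop := out = machine1_alt w
instance (w : String) (out : Bool) : Decidable (Spec_machine1 w out) := by unfold Spec_machine1; infer_instance

-- ===== CLAIM (what is proved, stated in full; the proofs are below) =====
def Claim_equal_machine1 : Prop := ∀ (w : String), Dom_machine1 w → Spec_machine1 w (machine1 w)

-- ===== LEMMAS AND PROOFS =====

theorem scan_true_iff (l : List Char) : machine1Scan l true = true ↔ l.count '0' = 0 := by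
  induction l with
  | nil => simp [machine1Scan]
  | cons c r ih =>
    by_cases h1 : c = '1'
    · subst h1
      simp [machine1Scan, List.count_cons, ih]
    · by_cases h0 : c = '0'
      · subst h0
        simp [machine1Scan, h1, List.count_cons]
      · simp [machine1Scan, h1, h0, List.count_cons, Ne.symm h0, ih]

theorem filter_no0 (l : List Char) (h : l.count '0' = 0) :
    l.filter machine1Is01 = List.replicate (l.count '1') '1' := by
  induction l with
  | nil => simp
  | cons c r ih =>
    have hc0 : c ≠ '0' := by
      intro hc; subst hc; simp [List.count_cons] at h
    have hr : r.count '0' = 0 := by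
      simp [List.count_cons, Ne.symm hc0] at h; exact h.1
    by_cases h1 : c = '1'
    · subst h1
      simp [List.filter_cons, machine1Is01, List.count_cons, List.replicate_succ, ih hr]
    · simp [List.filter_cons, machine1Is01, hc0, h1, List.count_cons, Ne.symm h1, ih hr]

theorem scan_false_iff (l : List Char) :
    machine1Scan l false = true ↔
      l.filter machine1Is01
        = List.replicate (l.count '0') '0' ++ List.replicate (l.count '1') '1' := by
  induction l with
  | nil => simp [machine1Scan]
  | cons c r ih =>
    by_cases h1 : c = '1'
    · subst h1
      rw [show machine1Scan ('1' :: r) false = machine1Scan r true from rfl, scan_true_iff]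
      constructor
      · intro h
        simp [List.filter_cons, machine1Is01, List.count_cons, h, List.replicate_succ,
          filter_no0 r h]
      · intro h
        by_contra hne
        rcases hn : r.count '0' with _ | n
        · exact hne hn
        · rw [List.count_cons, List.count_cons] at h
          simp [machine1Is01, hn, List.replicate_succ, List.filter_cons] at h
    · by_cases h0 : c = '0'
      · subst h0
        rw [show machine1Scan ('0' :: r) false = machine1Scan r false from rfl, ih]
        simp [List.filter_cons, machine1Is01, List.count_cons, h1, Ne.symm h1,
          List.replicate_succ]
      · have hstep : machine1Scan (c :: r) false = machine1Scan r false := by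
          simp [machine1Scan, h0, h1]
        rw [hstep, ih]
        simp [List.filter_cons, machine1Is01, h0, h1, List.count_cons, Ne.symm h0, Ne.symm h1]

theorem cross_counts (t : List Char) :
    (machine1Cross t).count '0' = t.count '0' - min (t.count '0') (t.count '1') ∧
    (machine1Cross t).count '1' = t.count '1' - min (t.count '0') (t.count '1') := by
  induction t using machine1Cross.induct with
  | case1 t h ih =>
    have h0 : '0' ∈ t := h.1
    have h1 : '1' ∈ t := h.2
    have e0 : (machine1Mark '0' 'X' t).count '0' + 1 = t.count '0' :=
      machine1Mark_count_self '0' 'X' (by decide) t h0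
    have e0' : (machine1Mark '1' 'X' (machine1Mark '0' 'X' t)).count '0'
        = (machine1Mark '0' 'X' t).count '0' :=
      machine1Mark_count_other '1' 'X' '0' (by decide) (by decide) _
    have e1 : (machine1Mark '0' 'X' t).count '1' = t.count '1' :=
      machine1Mark_count_other '0' 'X' '1' (by decide) (by decide) _
    have h1' : '1' ∈ machine1Mark '0' 'X' t := by
      apply List.count_pos_iff.mp
      have := List.count_pos_iff.mpr h1
      omega
    have e1' : (machine1Mark '1' 'X' (machine1Mark '0' 'X' t)).count '1' + 1
        = (machine1Mark '0' 'X' t).count '1' :=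
      machine1Mark_count_self '1' 'X' (by decide) _ h1'
    rw [machine1Cross, dif_pos h]
    have hc0 : 0 < t.count '0' := List.count_pos_iff.mpr h0
    have hc1 : 0 < t.count '1' := List.count_pos_iff.mpr h1
    omega
  | case2 t h =>
    rw [machine1Cross, dif_neg h]
    have hcases : ¬ '0' ∈ t ∨ ¬ '1' ∈ t := by tauto
    rcases hcases with h' | h'
    · have hz : t.count '0' = 0 := by
        by_contra hc
        exact h' (List.count_pos_iff.mp (Nat.pos_of_ne_zero hc))
      omega
    · have hz : t.count '1' = 0 := by
        by_contra hc
        exact h' (List.count_pos_iff.mp (Nat.pos_of_ne_zero hc))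
      omega

theorem machine1_true_iff (w : String) :
    machine1 w = true ↔
      (w.toList.filter machine1Is01
          = List.replicate (w.toList.count '0') '0' ++ List.replicate (w.toList.count '1') '1')
        ∧ w.toList.count '0' = w.toList.count '1' := by
  unfold machine1
  set l := w.toList with hl
  by_cases hs : machine1Scan l false = true
  · have hc := cross_counts l
    simp only [hs, if_true]
    have hmem : ('0' ∈ machine1Cross l ∨ '1' ∈ machine1Cross l) ↔ l.count '0' ≠ l.count '1' := by
      constructor
      · intro h
        rcases h with h | h <;>
          · have := List.count_pos_iff.mpr h; omega
      · intro h
        by_cases hlt : l.count '0' < l.count '1'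
        · right
          apply List.count_pos_iff.mp
          omega
        · left
          apply List.count_pos_iff.mp
          omega
    rw [scan_false_iff] at hs
    by_cases hq : '0' ∈ machine1Cross l ∨ '1' ∈ machine1Cross l
    · have hne := hmem.mp hq
      simp only [hq, if_true]
      constructor
      · intro h; exact absurd h (by simp)
      · intro h; exact absurd h.2 hne
    · have heq : l.count '0' = l.count '1' := by
        by_contra hne
        exact hq (hmem.mpr hne)
      rw [if_neg hq]
      simp [hs, heq]
  · rw [if_neg hs]
    constructor
    · intro h
      exact absurd h (by simp)
    · intro h
      exact absurd ((scan_false_iff l).mpr h.1) hs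

theorem machine1_alt_true_iff (w : String) :
    machine1_alt w = true ↔
      (w.toList.filter machine1Is01
          = List.replicate (w.toList.count '0') '0' ++ List.replicate (w.toList.count '1') '1')
        ∧ w.toList.count '0' = w.toList.count '1' := by
  unfold machine1_alt
  set l := w.toList with hl
  set s := l.filter machine1Is01 with hsdef
  simp only [beq_iff_eq]
  have hc0 : s.count '0' = l.count '0' := by
    rw [hsdef, List.count_filter]; simp [machine1Is01]
  have hc1 : s.count '1' = l.count '1' := by
    rw [hsdef, List.count_filter]; simp [machine1Is01]
  constructor
  · intro h
    have hl0 : l.count '0' = s.length / 2 := by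
      rw [← hc0, h]
      simp [List.count_replicate]
      omega
    have hl1 : l.count '1' = s.length / 2 := by
      rw [← hc1, h]
      simp [List.count_replicate]
      omega
    refine ⟨?_, by omega⟩
    rw [h, hl0, hl1]
  · rintro ⟨h, heq⟩
    have hlen : s.length = l.count '0' + l.count '1' := by
      rw [h]; simp
    have hhalf : s.length / 2 = l.count '0' := by omega
    rw [hhalf, h, heq]

-- ===== VERDICT (by name: the statement is the Claim_ definition above) =====
theorem machine1_spec : Claim_equal_machine1 := by
  intro w _
  unfold Spec_machine1
  have hA := machine1_true_iff w
  have hB := machine1_alt_true_iff w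
  cases hA' : machine1 w <;> cases hB' : machine1_alt w <;> simp_all
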